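-- pv_equiv track=rewrite | github.com/NoisNette/Codesignal-solutions | ballsRearranging.py | ballsRearranging
-- ===== SOURCE A (Python) =====
-- def ballsRearranging(balls):
--     balls.sort()
--     i, mx = 0, 0
--     for j in range(len(balls)):
--         while balls[i] <= balls[j] - len(balls):
--             i += 1
--         mx = max(mx, j-i+1)
--     return len(balls) - mx
-- ===== SOURCE B (Python) =====
-- def _bisect_right(a, x):
--     lo, hi = 0, len(a)
--     while lo < hi:
--         mid = (lo + hi) // 2
--         if a[mid] <= x:
--             lo = mid + 1
--         else:
--             hi = mid
--     return lo
--
--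
-- def ballsRearranging(balls):
--     balls.sort()
--     n = len(balls)
--     mx = 0
--     for j in range(n):
--         i = _bisect_right(balls, balls[j] - n)
--         mx = max(mx, j - i + 1)
--     return n - mx
-- ===== Notes on version B (the rewrite author's own statement) =====
-- stated objective: alternative
-- what changed: Replaces the amortized two-pointer left boundary (a persistent index advanced by an inner while loop) with an independent hand-written binary search per right endpoint over the sorted list; no state is carried between iterations.
import Mathlib
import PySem

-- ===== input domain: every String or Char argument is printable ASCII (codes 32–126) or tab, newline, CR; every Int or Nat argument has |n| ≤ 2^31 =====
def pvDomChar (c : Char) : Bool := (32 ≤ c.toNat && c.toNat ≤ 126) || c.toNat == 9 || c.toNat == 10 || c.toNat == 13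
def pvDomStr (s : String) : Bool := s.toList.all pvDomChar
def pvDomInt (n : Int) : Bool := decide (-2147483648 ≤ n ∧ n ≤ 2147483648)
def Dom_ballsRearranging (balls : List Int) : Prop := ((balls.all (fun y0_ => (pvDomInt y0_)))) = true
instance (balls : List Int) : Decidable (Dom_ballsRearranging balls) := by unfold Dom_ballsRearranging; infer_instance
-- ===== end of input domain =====

-- B replaces A's amortized two-pointer (a persistent left index advanced by an inner while loop) by an
-- independent hand-written binary search per right endpoint ('alternative'); equal return values.
-- Both Pythons sort the argument in place; the equivalence proved here is about the RETURN value.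

-- ===== PORT A =====
-- the inner 'while balls[i] <= t: i += 1'; the none branch returns i where Python would raise
-- IndexError (unreachable when called as A calls it: the loop halts at index j at the latest)
def pvAdvA (l : List Int) (t : Int) (i : Nat) : Nat :=
  match h : PySem.List.pyGet? l (i : Int) with
  | some v => if v ≤ t then pvAdvA l t (i + 1) else i
  | none => i
termination_by l.length - i
decreasing_by
  rw [PySem.List.pyGet?_natCast] at h
  have : i < l.length := by
    by_contra hc
    simp [List.getElem?_eq_none (by omega : l.length ≤ i)] at h
  omega

def ballsRearranging (balls : List Int) : Int :=
  let l := PySem.List.sorted balls (fun x => x) false     -- balls.sort()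
  let n := l.length
  let s := (List.range n).foldl
    (fun (s : Nat × Int) (j : Nat) =>
      match PySem.List.pyGet? l (j : Int) with            -- balls[j] (always in range here)
      | some bj =>
        let i := pvAdvA l (bj - (n : Int)) s.1
        (i, max s.2 ((j : Int) - (i : Int) + 1))
      | none => s) (0, 0)
  (n : Int) - s.2

-- ===== PORT B =====
-- Source B's hand-written _bisect_right: lo, hi = 0, len(a); while lo < hi: …
-- (lo + hi) // 2 on nonnegative ints is Nat division (exact); the none branch returns lo where
-- Python would raise IndexError (unreachable: mid < hi ≤ len(a))
def pvBsr (l : List Int) (x : Int) (lo hi : Nat) : Nat :=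
  if lo < hi then
    let mid := (lo + hi) / 2
    match PySem.List.pyGet? l (mid : Int) with
    | some v => if v ≤ x then pvBsr l x (mid + 1) hi else pvBsr l x lo mid
    | none => lo
  else lo
termination_by hi - lo
decreasing_by all_goals omega

def ballsRearranging_alt (balls : List Int) : Int :=
  let l := PySem.List.sorted balls (fun x => x) false     -- balls.sort()
  let n := l.length
  let mx := (List.range n).foldl
    (fun (mx : Int) (j : Nat) =>
      match PySem.List.pyGet? l (j : Int) with            -- balls[j]
      | some bj => max mx ((j : Int) - ((pvBsr l (bj - (n : Int)) 0 n : Nat) : Int) + 1)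
      | none => mx) 0
  (n : Int) - mx

-- ===== PRECONDITION & SPEC =====
def Spec_ballsRearranging (balls : List Int) (out : Int) : Prop := out = ballsRearranging_alt balls
instance (balls : List Int) (out : Int) : Decidable (Spec_ballsRearranging balls out) := by unfold Spec_ballsRearranging; infer_instance

-- ===== CLAIM (what is proved, stated in full; the proofs are below) =====
def Claim_equal_ballsRearranging : Prop := ∀ (balls : List Int), Dom_ballsRearranging balls → Spec_ballsRearranging balls (ballsRearranging balls)

-- ===== LEMMAS AND PROOFS =====

def pvCnt (l : List Int) (t : Int) : Nat := (l.takeWhile (fun v => decide (v ≤ t))).length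

theorem pvCnt_le_length (l : List Int) (t : Int) : pvCnt l t ≤ l.length := by
  unfold pvCnt; exact (List.takeWhile_prefix _).length_le

theorem pvCnt_get_le (l : List Int) (t : Int) {i : Nat} (hi : i < pvCnt l t) :
    ∃ h : i < l.length, l[i] ≤ t := by
  unfold pvCnt at hi
  induction l generalizing i with
  | nil => simp at hi
  | cons a l ih =>
    by_cases h : a ≤ t
    · cases i with
      | zero => exact ⟨by simp, h⟩
      | succ k =>
        simp [h] at hi
        obtain ⟨hk, hle⟩ := ih (by omega)
        exact ⟨by simp; omega, by simpa using hle⟩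
    · simp [List.takeWhile_cons, h] at hi

theorem pvCnt_stop (l : List Int) (t : Int) (h : pvCnt l t < l.length) :
    t < l[pvCnt l t]'h := by
  unfold pvCnt at *
  induction l with
  | nil => simp at h
  | cons a l ih =>
    by_cases ha : a ≤ t
    · simp only [List.takeWhile_cons, ha, decide_true, List.length_cons] at h ⊢
      simpa using ih (by simpa using h)
    · simp only [List.takeWhile_cons, ha, decide_false, List.length_nil] at h ⊢
      simpa using not_le.mp ha

theorem pvCnt_mono (l : List Int) {t t' : Int} (h : t ≤ t') : pvCnt l t ≤ pvCnt l t' := by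
  unfold pvCnt
  induction l with
  | nil => simp
  | cons a l ih =>
    by_cases ha : a ≤ t
    · simp [List.takeWhile_cons, ha, le_trans ha h]; omega
    · simp [List.takeWhile_cons, ha]


theorem pvAdvA_eq_cnt (l : List Int) (t : Int) :
    ∀ i, i ≤ pvCnt l t → pvAdvA l t i = pvCnt l t := by
  intro i hi
  rw [pvAdvA]
  split
  · rename_i v heq
    rw [PySem.List.pyGet?_natCast] at heq
    have hil : i < l.length := by
      by_contra hc
      simp [List.getElem?_eq_none (by omega : l.length ≤ i)] at heq
    have hv : v = l[i] := by simpa [List.getElem?_eq_getElem hil] using heq.symm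
    split_ifs with hvt
    · have hlt : i < pvCnt l t := by
        rcases Nat.lt_or_ge i (pvCnt l t) with h | h
        · exact h
        · have hieq : i = pvCnt l t := by omega
          have h2 := pvCnt_stop l t (hieq ▸ hil)
          simp only [← hieq] at h2
          omega
      exact pvAdvA_eq_cnt l t (i + 1) (by omega)
    · rcases Nat.lt_or_ge i (pvCnt l t) with h | h
      · obtain ⟨_, hle⟩ := pvCnt_get_le l t h
        omega
      · omega
  · rename_i heq
    rw [PySem.List.pyGet?_natCast] at heq
    have : l.length ≤ i := by
      by_contra hc
      simp [List.getElem?_eq_getElem (by omega : i < l.length)] at heq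
    have := pvCnt_le_length l t
    omega
termination_by i => pvCnt l t - i


theorem pvBsr_eq_cnt (l : List Int) (t : Int)
    (hmono : ∀ (p q : Nat) (hpq : p ≤ q) (hq : q < l.length),
      l[p]'(Nat.lt_of_le_of_lt hpq hq) ≤ l[q]) :
    ∀ lo hi, lo ≤ pvCnt l t → pvCnt l t ≤ hi → hi ≤ l.length → pvBsr l t lo hi = pvCnt l t := by
  intro lo hi hlo hhi hlen
  rw [pvBsr]
  by_cases h : lo < hi
  · simp only [h, if_true]
    have hmidl : (lo + hi) / 2 < l.length := by omega
    simp only [PySem.List.pyGet?_natCast, List.getElem?_eq_getElem hmidl]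
    by_cases hv : l[(lo + hi) / 2] ≤ t
    · simp only [hv, if_true]
      have hc : (lo + hi) / 2 < pvCnt l t := by
        by_contra hc
        have h1 := pvCnt_stop l t (by omega)
        have h2 := hmono (pvCnt l t) ((lo + hi) / 2) (by omega) hmidl
        omega
      exact pvBsr_eq_cnt l t hmono ((lo + hi) / 2 + 1) hi (by omega) hhi hlen
    · simp only [hv, if_false]
      have hc : pvCnt l t ≤ (lo + hi) / 2 := by
        by_contra hc
        obtain ⟨_, hle⟩ := pvCnt_get_le l t (by omega : (lo + hi) / 2 < pvCnt l t)
        exact hv hle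
      exact pvBsr_eq_cnt l t hmono lo ((lo + hi) / 2) hlo hc (by omega)
  · simp only [h, if_false]
    omega
termination_by lo hi => hi - lo

theorem pvFold_eq (l : List Int)
    (hmono : ∀ (p q : Nat) (hpq : p ≤ q) (hq : q < l.length),
      l[p]'(Nat.lt_of_le_of_lt hpq hq) ≤ l[q]) :
    ∀ (js : List Nat), (∀ j ∈ js, j < l.length) → js.Pairwise (· ≤ ·) →
    ∀ (i : Nat) (mx : Int),
    (∀ j ∈ js, ∀ h : j < l.length, i ≤ pvCnt l (l[j] - (l.length : Int))) →
    (js.foldl (fun (s : Nat × Int) (j : Nat) =>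
      match PySem.List.pyGet? l (j : Int) with
      | some bj =>
        let i := pvAdvA l (bj - (l.length : Int)) s.1
        (i, max s.2 ((j : Int) - (i : Int) + 1))
      | none => s) (i, mx)).2 =
    js.foldl (fun (mx : Int) (j : Nat) =>
      match PySem.List.pyGet? l (j : Int) with
      | some bj => max mx ((j : Int) - ((pvBsr l (bj - (l.length : Int)) 0 l.length : Nat) : Int) + 1)
      | none => mx) mx := by
  intro js
  induction js with
  | nil => intro _ _ i mx _; rfl
  | cons j js ih =>
    intro hjs hpw i mx hinv
    have hj : j < l.length := hjs j (by simp)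
    have hget : PySem.List.pyGet? l (j : Int) = some l[j] := by
      rw [PySem.List.pyGet?_natCast, List.getElem?_eq_getElem hj]
    simp only [List.foldl_cons, hget]
    have hadv : pvAdvA l (l[j] - (l.length : Int)) i = pvCnt l (l[j] - (l.length : Int)) :=
      pvAdvA_eq_cnt l _ i (hinv j (by simp) hj)
    have hbsr : pvBsr l (l[j] - (l.length : Int)) 0 l.length = pvCnt l (l[j] - (l.length : Int)) :=
      pvBsr_eq_cnt l _ hmono 0 l.length (Nat.zero_le _) (pvCnt_le_length _ _) le_rfl
    simp only [hadv, hbsr]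
    apply ih (fun k hk => hjs k (by simp [hk])) ((List.pairwise_cons.mp hpw).2)
    intro k hk hkl
    have hjk : j ≤ k := (List.pairwise_cons.mp hpw).1 k hk
    exact pvCnt_mono l (by have := hmono j k hjk hkl; omega)

-- ===== VERDICT (by name: the statement is the Claim_ definition above) =====
theorem ballsRearranging_spec : Claim_equal_ballsRearranging := by
  intro balls _
  simp only [Spec_ballsRearranging, ballsRearranging, ballsRearranging_alt]
  have hmono : ∀ (p q : Nat) (hpq : p ≤ q)
      (hq : q < (PySem.List.sorted balls (fun x => x) false).length),
      (PySem.List.sorted balls (fun x => x) false)[p]'(Nat.lt_of_le_of_lt hpq hq) ≤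
      (PySem.List.sorted balls (fun x => x) false)[q] :=
    fun p q hpq hq => PySem.List.sorted_id_getElem_mono balls hpq hq
  have h := pvFold_eq (PySem.List.sorted balls (fun x => x) false) hmono
    (List.range (PySem.List.sorted balls (fun x => x) false).length)
    (fun j hj => List.mem_range.mp hj)
    (List.Pairwise.imp le_of_lt List.pairwise_lt_range)
    0 0 (fun _ _ _ => Nat.zero_le _)
  rw [h]
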